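-- pv_equiv track=rewrite | github.com/rmfoard/three-nets | gen_graph.py | key_points
-- ===== SOURCE A (Python) =====
-- def spiral_points():
--     """Generate 2D coordinates spiraling out from (0, 1).
--     """
--     x = 0
--     xmin = -1
--     xmax = 1
--
--     y = 1
--     ymin = 0
--     ymax = 2
--
--     yield (x, y)
--     while True:
--         while x < xmax:
--             x += 1
--             yield (x, y)
--         xmax += 1
--
--         while y > ymin:
--             y -= 1
--             yield (x, y)
--         ymin -= 1
--
--         while x > xmin:
--             x -= 1
--             yield (x, y)
--         xmin -= 1
--
--         while y < ymax:
--             y += 1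
--             yield (x, y)
--         ymax += 1
--
-- def key_points(max_points):
--     """Generate hexagon "key points" spiraling out from (0, 1).
--
--     Generate coordinates for the leftmost vertexes of hexagons that
--     tile a plane. Filter a generated "spiral-out" sequence of
--     all 2D coordinates.
--     """
--     nr_points = 0
--     pointgen = spiral_points()
--     while True:
--         if nr_points > max_points:
--             break
--         else:
--             coord = next(pointgen)
--             x = coord[0]
--             y = coord[1]
--             if (x % 2) == 0:
--                 if (x % 4) == 0:
--                     if (y % 2) == 1:
--                         nr_points += 1
--                         yield coord
--                 elif (y % 2) == 0:
--                     nr_points += 1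
--                     yield coord
-- ===== SOURCE B (Python) =====
-- # B: single run-length spiral walker (directions cycle R,D,L,U; leg lengths grow by one after every second leg)
-- # replacing A's spiral_points bounds generator; same yielded key points.
-- DIRS = ((1, 0), (0, -1), (-1, 0), (0, 1))
--
--
-- def _keep(x, y):
--     """A lattice point is a hexagon key point iff x is even and
--     y's parity is odd when 4 | x and even otherwise."""
--     if x % 2:
--         return False
--     return y % 2 == (1 if x % 4 == 0 else 0)
--
--
-- def _advance(x, y, d, run, rem, leg):
--     """One spiral step: rotate into the next leg (run lengths grow every
--     second leg) when the current one is exhausted, then move."""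
--     if rem == 0:
--         leg += 1
--         d = (d + 1) % 4
--         if leg % 2 == 0:
--             run += 1
--         rem = run
--     dx, dy = DIRS[d]
--     return x + dx, y + dy, d, run, rem - 1, leg
--
--
-- def key_points(max_points):
--     count = 0
--     x, y, d, run, rem, leg = 0, 1, 0, 1, 1, 0
--     while count <= max_points:
--         if _keep(x, y):
--             count += 1
--             yield (x, y)
--         x, y, d, run, rem, leg = _advance(x, y, d, run, rem, leg)
-- ===== Notes on version B (the rewrite author's own statement) =====
-- stated objective: simpler
-- what changed: Replaced A's spiral_points generator (six mutable bounds xmin/xmax/ymin/ymax plus four nested while-loops) and its separate consumer loop by one self-contained walker that cycles direction vectors (1,0),(0,-1),(-1,0),(0,1) whose run lengths start at one and grow after every second leg, applying the same lattice filter and count.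
import Mathlib
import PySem

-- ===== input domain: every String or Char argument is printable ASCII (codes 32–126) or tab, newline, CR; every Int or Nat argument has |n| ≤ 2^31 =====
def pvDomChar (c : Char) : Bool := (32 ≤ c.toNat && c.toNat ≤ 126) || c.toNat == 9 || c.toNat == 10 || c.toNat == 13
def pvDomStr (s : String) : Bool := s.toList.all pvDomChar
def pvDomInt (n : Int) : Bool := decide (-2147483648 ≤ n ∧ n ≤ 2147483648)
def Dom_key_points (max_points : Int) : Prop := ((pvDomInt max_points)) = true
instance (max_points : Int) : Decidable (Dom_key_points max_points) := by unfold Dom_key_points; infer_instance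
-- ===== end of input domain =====

-- B replaces A's four-while-loop bounds generator by one run-length spiral walker (objective: simpler).
-- Both Pythons are generators; the ports return the list of yielded points. Python's `%` with the
-- positive divisors 2 and 4 agrees with Lean's Int.emod `%`, used throughout.
-- Both loops visit exactly one spiral point per iteration; the fuel 8*(max_points.toNat+2)+16 is a
-- totality device only (kept-point density along the spiral is ~1/4, so it is never exhausted);
-- the equivalence theorem holds for the ports as written.

-- ===== PORT A =====

inductive PhaseA
  | r | d | l | u
deriving DecidableEq, Repr

-- generator state of spiral_points between yields (after the initial yield of (0,1))
structure SA where
  x : Int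
  xmin : Int
  xmax : Int
  y : Int
  ymin : Int
  ymax : Int
  phase : PhaseA
deriving DecidableEq, Repr

-- one `next(pointgen)`: run the current while-loop; if it is exhausted, adjust the bound and
-- fall through to the next loop (the Nat argument bounds those fall-throughs; from any state
-- the generator reaches, at most one happens before a yield, so 4 is never exhausted).
def nextA : Nat → SA → (Int × Int) × SA
  | 0, s => ((s.x, s.y), s)  -- unreachable for states the generator produces
  | k+1, s =>
    match s.phase with
    | .r => if s.x < s.xmax then ((s.x + 1, s.y), { s with x := s.x + 1 })
            else nextA k { s with xmax := s.xmax + 1, phase := .d }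
    | .d => if s.y > s.ymin then ((s.x, s.y - 1), { s with y := s.y - 1 })
            else nextA k { s with ymin := s.ymin - 1, phase := .l }
    | .l => if s.x > s.xmin then ((s.x - 1, s.y), { s with x := s.x - 1 })
            else nextA k { s with xmin := s.xmin - 1, phase := .u }
    | .u => if s.y < s.ymax then ((s.x, s.y + 1), { s with y := s.y + 1 })
            else nextA k { s with ymax := s.ymax + 1, phase := .r }

-- generator state including the initial `yield (x, y)`
inductive GA
  | start
  | run (s : SA)
deriving DecidableEq, Repr

def nextG : GA → (Int × Int) × GA
  | .start => ((0, 1), .run ⟨0, -1, 1, 1, 0, 2, .r⟩)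
  | .run s => let p := nextA 4 s; (p.1, .run p.2)

-- the `while True` of key_points; one fuel per iteration
def loopA : Nat → GA → Int → Int → List (Int × Int)
  | 0, _, _, _ => []
  | f+1, g, nr, mp =>
    if nr > mp then []
    else
      let p := nextG g
      let x := p.1.1
      let y := p.1.2
      if x % 2 = 0 then
        if x % 4 = 0 then
          if y % 2 = 1 then p.1 :: loopA f p.2 (nr + 1) mp
          else loopA f p.2 nr mp
        else if y % 2 = 0 then p.1 :: loopA f p.2 (nr + 1) mp
        else loopA f p.2 nr mp
      else loopA f p.2 nr mp

def key_points (max_points : Int) : List (Int × Int) :=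
  loopA (8 * (max_points.toNat + 2) + 16) .start 0 max_points

-- ===== PORT B =====

-- DIRS = ((1,0),(0,-1),(-1,0),(0,1))
def dirB : Nat → Int × Int
  | 0 => (1, 0)
  | 1 => (0, -1)
  | 2 => (-1, 0)
  | _ => (0, 1)

-- _keep(x, y)
def keepB (x y : Int) : Bool :=
  if x % 2 ≠ 0 then false
  else y % 2 == (if x % 4 = 0 then (1 : Int) else 0)

structure SB where
  x : Int
  y : Int
  d : Nat
  run : Nat
  rem : Nat
  leg : Nat
deriving DecidableEq, Repr

-- _advance(x, y, d, run, rem, leg)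
def advanceB (b : SB) : SB :=
  let t : Nat × Nat × Nat × Nat :=
    if b.rem = 0 then
      let leg := b.leg + 1
      let d := (b.d + 1) % 4
      let run := if leg % 2 = 0 then b.run + 1 else b.run
      (d, run, run, leg)
    else (b.d, b.run, b.rem, b.leg)
  let p := dirB t.1
  ⟨b.x + p.1, b.y + p.2, t.1, t.2.1, t.2.2.1 - 1, t.2.2.2⟩

-- the `while count <= max_points` loop; one fuel per iteration
def loopB : Nat → SB → Int → Int → List (Int × Int)
  | 0, _, _, _ => []
  | f+1, b, count, mp =>
    if count > mp then []
    else if keepB b.x b.y then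
      (b.x, b.y) :: loopB f (advanceB b) (count + 1) mp
    else loopB f (advanceB b) count mp

def key_points_alt (max_points : Int) : List (Int × Int) :=
  loopB (8 * (max_points.toNat + 2) + 16) ⟨0, 1, 0, 1, 1, 0⟩ 0 max_points

-- ===== PRECONDITION & SPEC =====
def Spec_key_points (max_points : Int) (out : List (Int × Int)) : Prop := out = key_points_alt max_points
instance (max_points : Int) (out : List (Int × Int)) : Decidable (Spec_key_points max_points out) := by unfold Spec_key_points; infer_instance

-- ===== CLAIM (what is proved, stated in full; the proofs are below) =====
def Claim_equal_key_points : Prop := ∀ (max_points : Int), Dom_key_points max_points → Spec_key_points max_points (key_points max_points)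

-- ===== LEMMAS AND PROOFS =====

-- number of completed right / down / left / up legs among B's legs 0 .. l-1
def crN (l : Nat) : Nat := (l + 3) / 4
def cdN (l : Nat) : Nat := (l + 2) / 4
def clN (l : Nat) : Nat := (l + 1) / 4
def cuN (l : Nat) : Nat := l / 4

def phaseOf : Nat → PhaseA
  | 0 => .r
  | 1 => .d
  | 2 => .l
  | _ => .u

-- coupling invariant: s is A's generator state just after yielding the point at which B stands
def KInv (s : SA) (b : SB) : Prop :=
  s.x = b.x ∧ s.y = b.y ∧
  s.phase = phaseOf (b.leg % 4) ∧
  b.d = b.leg % 4 ∧ b.run = b.leg / 2 + 1 ∧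
  s.xmax = 1 + (crN b.leg : Int) ∧ s.ymin = -(cdN b.leg : Int) ∧
  s.xmin = -1 - (clN b.leg : Int) ∧ s.ymax = 2 + (cuN b.leg : Int) ∧
  (b.leg % 4 = 0 → b.x = 1 + (crN b.leg : Int) - b.rem ∧ b.y = 1 + (cuN b.leg : Int)) ∧
  (b.leg % 4 = 1 → b.x = (crN b.leg : Int) ∧ b.y = -(cdN b.leg : Int) + b.rem) ∧
  (b.leg % 4 = 2 → b.x = -1 - (clN b.leg : Int) + b.rem ∧ b.y = 1 - (cdN b.leg : Int)) ∧
  (b.leg % 4 = 3 → b.x = -(clN b.leg : Int) ∧ b.y = 2 + (cuN b.leg : Int) - b.rem)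

theorem step_lemma (s : SA) (b : SB) (h : KInv s b) :
    ∃ s', nextA 4 s = (((advanceB b).x, (advanceB b).y), s') ∧ KInv s' (advanceB b) := by
  obtain ⟨sx, sxmin, sxmax, sy, symin, symax, sph⟩ := s
  obtain ⟨bx, byy, bd, brun, brem, bleg⟩ := b
  simp only [KInv] at h
  obtain ⟨hx, hy, hph, hd, hrun, hxmax, hymin, hxmin, hymax, h0, h1, h2, h3⟩ := h
  have h4 : bleg % 4 = 0 ∨ bleg % 4 = 1 ∨ bleg % 4 = 2 ∨ bleg % 4 = 3 := by omega
  rcases h4 with h4 | h4 | h4 | h4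
  · -- right leg
    rw [h4] at hph hd
    simp only [phaseOf] at hph
    subst hph; subst hd
    obtain ⟨hpx, hpy⟩ := h0 h4
    by_cases hbr : brem = 0
    · -- leg exhausted: A falls through to the down loop, B rotates
      have e1 : (bleg + 1) % 4 = 1 := by omega
      have e2 : ¬ ((bleg + 1) % 2 = 0) := by omega
      have hc1 : ¬ (sx < sxmax) := by omega
      have hc2 : symin < sy := by omega
      refine ⟨⟨sx, sxmin, sxmax + 1, sy - 1, symin, symax, .d⟩, ?_, ?_⟩
      · simp [nextA, advanceB, dirB, hbr, hc1, hc2, e2, Prod.mk.injEq]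
        omega
      · simp only [KInv, advanceB, hbr, dirB, e1, e2, if_true, if_false, phaseOf]
        simp only [crN, cdN, clN, cuN] at *
        and_intros <;> first | trivial | omega
    · -- mid-leg: A's x < xmax, B moves right
      have hc1 : sx < sxmax := by omega
      refine ⟨⟨sx + 1, sxmin, sxmax, sy, symin, symax, .r⟩, ?_, ?_⟩
      · simp [nextA, advanceB, dirB, hbr, hc1, Prod.mk.injEq]
        omega
      · simp only [KInv, advanceB, hbr, dirB, h4, if_false, phaseOf]
        simp only [crN, cdN, clN, cuN] at *
        and_intros <;> first | trivial | omega
  · -- down leg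
    rw [h4] at hph hd
    simp only [phaseOf] at hph
    subst hph; subst hd
    obtain ⟨hpx, hpy⟩ := h1 h4
    by_cases hbr : brem = 0
    · have e1 : (bleg + 1) % 4 = 2 := by omega
      have e2 : (bleg + 1) % 2 = 0 := by omega
      have hc1 : ¬ (symin < sy) := by omega
      have hc2 : sxmin < sx := by omega
      refine ⟨⟨sx - 1, sxmin, sxmax, sy, symin - 1, symax, .l⟩, ?_, ?_⟩
      · simp [nextA, advanceB, dirB, hbr, hc1, hc2, e2, Prod.mk.injEq]
        omega
      · simp only [KInv, advanceB, hbr, dirB, e1, e2, if_true, phaseOf]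
        simp only [crN, cdN, clN, cuN] at *
        and_intros <;> first | trivial | omega
    · have hc1 : symin < sy := by omega
      refine ⟨⟨sx, sxmin, sxmax, sy - 1, symin, symax, .d⟩, ?_, ?_⟩
      · simp [nextA, advanceB, dirB, hbr, hc1, Prod.mk.injEq]
        omega
      · simp only [KInv, advanceB, hbr, dirB, h4, if_false, phaseOf]
        simp only [crN, cdN, clN, cuN] at *
        and_intros <;> first | trivial | omega
  · -- left leg
    rw [h4] at hph hd
    simp only [phaseOf] at hph
    subst hph; subst hd
    obtain ⟨hpx, hpy⟩ := h2 h4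
    by_cases hbr : brem = 0
    · have e1 : (bleg + 1) % 4 = 3 := by omega
      have e2 : ¬ ((bleg + 1) % 2 = 0) := by omega
      have hc1 : ¬ (sxmin < sx) := by omega
      have hc2 : sy < symax := by omega
      refine ⟨⟨sx, sxmin - 1, sxmax, sy + 1, symin, symax, .u⟩, ?_, ?_⟩
      · simp [nextA, advanceB, dirB, hbr, hc1, hc2, e2, Prod.mk.injEq]
        omega
      · simp only [KInv, advanceB, hbr, dirB, e1, e2, if_true, if_false, phaseOf]
        simp only [crN, cdN, clN, cuN] at *
        and_intros <;> first | trivial | omega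
    · have hc1 : sxmin < sx := by omega
      refine ⟨⟨sx - 1, sxmin, sxmax, sy, symin, symax, .l⟩, ?_, ?_⟩
      · simp [nextA, advanceB, dirB, hbr, hc1, Prod.mk.injEq]
        omega
      · simp only [KInv, advanceB, hbr, dirB, h4, if_false, phaseOf]
        simp only [crN, cdN, clN, cuN] at *
        and_intros <;> first | trivial | omega
  · -- up leg
    rw [h4] at hph hd
    simp only [phaseOf] at hph
    subst hph; subst hd
    obtain ⟨hpx, hpy⟩ := h3 h4
    by_cases hbr : brem = 0
    · have e1 : (bleg + 1) % 4 = 0 := by omega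
      have e2 : (bleg + 1) % 2 = 0 := by omega
      have hc1 : ¬ (sy < symax) := by omega
      have hc2 : sx < sxmax := by omega
      refine ⟨⟨sx + 1, sxmin, sxmax, sy, symin, symax + 1, .r⟩, ?_, ?_⟩
      · simp [nextA, advanceB, dirB, hbr, hc1, hc2, e2, Prod.mk.injEq]
        omega
      · simp only [KInv, advanceB, hbr, dirB, e1, e2, if_true, phaseOf]
        simp only [crN, cdN, clN, cuN] at *
        and_intros <;> first | trivial | omega
    · have hc1 : sy < symax := by omega
      refine ⟨⟨sx, sxmin, sxmax, sy + 1, symin, symax, .u⟩, ?_, ?_⟩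
      · simp [nextA, advanceB, dirB, hbr, hc1, Prod.mk.injEq]
        omega
      · simp only [KInv, advanceB, hbr, dirB, h4, if_false, phaseOf]
        simp only [crN, cdN, clN, cuN] at *
        and_intros <;> first | trivial | omega

theorem loop_lemma (f : Nat) (s : SA) (b : SB) (nr mp : Int) (h : KInv s b) :
    loopA f (.run s) nr mp = loopB f (advanceB b) nr mp := by
  induction f generalizing s b nr with
  | zero => simp [loopA, loopB]
  | succ f ih =>
    obtain ⟨s', hnext, hinv⟩ := step_lemma s b h
    simp only [loopA, loopB, nextG, hnext]
    by_cases hnr : nr > mp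
    · simp [hnr]
    · simp only [hnr, if_false]
      by_cases m2 : (advanceB b).x % 2 = 0
      · by_cases m4 : (advanceB b).x % 4 = 0
        · by_cases p1 : (advanceB b).y % 2 = 1
          · simp [keepB, m2, m4, p1, ih _ _ _ hinv]
          · have p0 : (advanceB b).y % 2 = 0 := by omega
            simp [keepB, m2, m4, p0, ih _ _ _ hinv]
        · by_cases p0 : (advanceB b).y % 2 = 0
          · simp [keepB, m2, m4, p0, ih _ _ _ hinv]
          · have p1 : (advanceB b).y % 2 = 1 := by omega
            simp [keepB, m2, m4, p1, ih _ _ _ hinv]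
      · have modd : (advanceB b).x % 4 ≠ 0 := by omega
        simp [keepB, m2, ih _ _ _ hinv]

theorem start_lemma (f : Nat) (nr mp : Int) :
    loopA (f + 1) .start nr mp = loopB (f + 1) ⟨0, 1, 0, 1, 1, 0⟩ nr mp := by
  have hkinv : KInv ⟨0, -1, 1, 1, 0, 2, .r⟩ ⟨0, 1, 0, 1, 1, 0⟩ := by
    unfold KInv crN cdN clN cuN phaseOf; norm_num
  have hk : keepB 0 1 = true := by decide
  simp only [loopA, loopB, nextG, hk]
  by_cases hnr : nr > mp
  · simp [hnr]
  · norm_num [hnr]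
    exact loop_lemma _ _ _ _ _ hkinv

theorem key_points_spec : Claim_equal_key_points := by
  intro mp _
  unfold Spec_key_points key_points key_points_alt
  have hF : 8 * (mp.toNat + 2) + 16 = (8 * mp.toNat + 31) + 1 := by omega
  rw [hF]
  exact start_lemma _ _ _
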